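-- pv_equiv track=rewrite | github.com/PeterEbel/galeria-anatomica | create_product_variation_images.py | find_format
-- ===== SOURCE A (Python) =====
-- portrait_formats =  [(1240,1748),(1748,2480),(2480,3508),(3505,4961),(4961,7016),(7016,9933),(9933,14043)]
--
-- landscape_formats = [(1748,1240),(2480,1748),(3508,2480),(4961,3505),(7016,4961),(9933,7016),(14043,9933)]
--
-- def find_format (_width, _height, _offset):
--     i = 0
--   # Portait
--     if _width < _height:
--         while _width + _offset > portrait_formats[i][0]:
--             i = i + 1
--         while _height + _offset > portrait_formats[i][1]:
--             i = i + 1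
--         return portrait_formats[i][0], portrait_formats[i][1]
--   # Landscape
--     if _width >= _height:
--         while _width + _offset > landscape_formats[i][0]:
--             i = i + 1
--         while _height + _offset > landscape_formats[i][1]:
--             i = i + 1
--         return landscape_formats[i][0], landscape_formats[i][1]
-- ===== SOURCE B (Python) =====
-- portrait_formats =  [(1240,1748),(1748,2480),(2480,3508),(3505,4961),(4961,7016),(7016,9933),(9933,14043)]
--
-- landscape_formats = [(1748,1240),(2480,1748),(3508,2480),(4961,3505),(7016,4961),(9933,7016),(14043,9933)]
--
-- def _first_fit(vals, limit):
--     k = 0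
--     for v in vals:
--         if limit <= v:
--             break
--         k += 1
--     return k
--
-- def find_format(_width, _height, _offset):
--     formats = portrait_formats if _width < _height else landscape_formats
--     wi = _first_fit([w for w, _ in formats], _width + _offset)
--     hj = _first_fit([h for _, h in formats], _height + _offset)
--     return formats[max(wi, hj)]
-- ===== Notes on version B (the rewrite author's own statement) =====
-- stated objective: simpler
-- what changed: Replaces A's single shared index threaded through two chained while-loops with two independent first-fit scans (one per dimension) and a final max of the two indices; monotonicity of the fixed format lists makes the results equal.
import Mathlib
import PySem

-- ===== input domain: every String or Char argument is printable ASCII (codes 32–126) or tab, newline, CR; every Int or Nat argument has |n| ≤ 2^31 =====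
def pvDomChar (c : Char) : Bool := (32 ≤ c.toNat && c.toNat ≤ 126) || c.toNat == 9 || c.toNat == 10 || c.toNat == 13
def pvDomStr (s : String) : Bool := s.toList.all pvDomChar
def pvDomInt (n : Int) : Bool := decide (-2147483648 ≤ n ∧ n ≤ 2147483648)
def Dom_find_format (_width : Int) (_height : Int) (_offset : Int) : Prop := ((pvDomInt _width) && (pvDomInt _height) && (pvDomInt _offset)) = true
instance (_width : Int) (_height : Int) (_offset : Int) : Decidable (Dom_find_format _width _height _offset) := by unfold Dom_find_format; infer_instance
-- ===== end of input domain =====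

-- B computes the width-fit and height-fit indices independently and takes their max,
-- instead of A's one index chained through two while-loops (objective: simpler).
-- Pre_ excludes the inputs on which A raises IndexError (no format fits); B raises there too.

-- ===== PORT A =====
def portrait_formats : List (Int × Int) :=
  [(1240,1748),(1748,2480),(2480,3508),(3505,4961),(4961,7016),(7016,9933),(9933,14043)]

def landscape_formats : List (Int × Int) :=
  [(1748,1240),(2480,1748),(3508,2480),(4961,3505),(7016,4961),(9933,7016),(14043,9933)]

-- A's 'while x > fmts[i][c]: i = i + 1': the counter i together with the remaining
-- suffix fmts[i:] of the list being indexed; the empty-suffix case is where Python's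
-- fmts[i] raises IndexError (those inputs are excluded by Pre_).
def pvWhileGt (x : Int) (useFst : Bool) : List (Int × Int) → Nat → Nat
  | [], i => i
  | p :: rest, i =>
    if x > (if useFst then p.1 else p.2) then pvWhileGt x useFst rest (i + 1) else i

def find_format (_width : Int) (_height : Int) (_offset : Int) : Int × Int :=
  if _width < _height then
    let i1 := pvWhileGt (_width + _offset) true portrait_formats 0
    let i2 := pvWhileGt (_height + _offset) false (portrait_formats.drop i1) i1
    (PySem.List.pyGet? portrait_formats (Int.ofNat i2)).getD (0, 0)
  else
    let i1 := pvWhileGt (_width + _offset) true landscape_formats 0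
    let i2 := pvWhileGt (_height + _offset) false (landscape_formats.drop i1) i1
    (PySem.List.pyGet? landscape_formats (Int.ofNat i2)).getD (0, 0)

-- ===== PORT B =====
-- Source B's _first_fit: count of leading values below the limit (for-loop → structural recursion).
def pvFirstFit (vals : List Int) (limit : Int) : Nat :=
  match vals with
  | [] => 0
  | v :: rest => if limit ≤ v then 0 else 1 + pvFirstFit rest limit

def find_format_alt (_width : Int) (_height : Int) (_offset : Int) : Int × Int :=
  let formats := if _width < _height then portrait_formats else landscape_formats
  let wi := pvFirstFit (formats.map Prod.fst) (_width + _offset)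
  let hj := pvFirstFit (formats.map Prod.snd) (_height + _offset)
  (PySem.List.pyGet? formats (Int.ofNat (max wi hj))).getD (0, 0)

-- ===== PRECONDITION & SPEC =====
-- Exactly the inputs where Python A returns (no IndexError): the largest format of the
-- selected orientation fits both offset dimensions.
def Pre_find_format (_width : Int) (_height : Int) (_offset : Int) : Prop :=
  if _width < _height then _width + _offset ≤ 9933 ∧ _height + _offset ≤ 14043
  else _width + _offset ≤ 14043 ∧ _height + _offset ≤ 9933
instance (_width : Int) (_height : Int) (_offset : Int) : Decidable (Pre_find_format _width _height _offset) := by unfold Pre_find_format; infer_instance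
def pvWitness_find_format : Int × Int × Int := (1000, 2000, 10)

def Spec_find_format (_width : Int) (_height : Int) (_offset : Int) (out : Int × Int) : Prop := out = find_format_alt _width _height _offset
instance (_width : Int) (_height : Int) (_offset : Int) (out : Int × Int) : Decidable (Spec_find_format _width _height _offset out) := by unfold Spec_find_format; infer_instance

-- ===== CLAIM (what is proved, stated in full; the proofs are below) =====
def Claim_equal_find_format : Prop := ∀ (_width : Int) (_height : Int) (_offset : Int), Dom_find_format _width _height _offset → Pre_find_format _width _height _offset → Spec_find_format _width _height _offset (find_format _width _height _offset)

-- ===== LEMMAS AND PROOFS =====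

-- A's while-loop advances the counter by exactly B's first-fit count of the projected values.
theorem pvWhileGt_eq_firstFit (x : Int) (useFst : Bool) (l : List (Int × Int)) (i : Nat) :
    pvWhileGt x useFst l i = i + pvFirstFit (l.map (if useFst then Prod.fst else Prod.snd)) x := by
  induction l generalizing i with
  | nil => simp [pvWhileGt, pvFirstFit]
  | cons p rest ih =>
    simp only [pvWhileGt, pvFirstFit, List.map]
    by_cases h : x > (if useFst then p.1 else p.2)
    · rw [if_pos h, if_neg (by cases useFst <;> simp_all), ih]
      omega
    · rw [if_neg h, if_pos (by cases useFst <;> simp_all)]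
      omega

theorem pvFirstFit_eq_zero_of_le (vals : List Int) (y : Int) (h : ∀ a ∈ vals, y ≤ a) :
    pvFirstFit vals y = 0 := by
  cases vals with
  | nil => rfl
  | cons v rest => simp [pvFirstFit, h v (by simp)]

-- On a nondecreasing list, resuming the first-fit scan at index k lands at max k (full scan).
theorem pvFirstFit_drop (vals : List Int) (y : Int) (k : Nat) (hs : vals.Pairwise (· ≤ ·)) :
    k + pvFirstFit (vals.drop k) y = max k (pvFirstFit vals y) := by
  induction k generalizing vals with
  | zero => simp
  | succ k ih =>
    cases vals with
    | nil => simp [pvFirstFit]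
    | cons v rest =>
      simp only [List.drop_succ_cons, pvFirstFit]
      by_cases h : y ≤ v
      · rw [if_pos h]
        have h0 : pvFirstFit (rest.drop k) y = 0 := by
          apply pvFirstFit_eq_zero_of_le
          intro a ha
          exact le_trans h ((List.pairwise_cons.mp hs).1 a (List.mem_of_mem_drop ha))
        omega
      · rw [if_neg h]
        have := ih rest (List.pairwise_cons.mp hs).2
        omega

-- ===== VERDICT (by name: the statement is the Claim_ definition above) =====
theorem find_format_spec : Claim_equal_find_format := by
  intro w h o _ hpre
  unfold Spec_find_format find_format find_format_alt Pre_find_format at *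
  by_cases hwh : w < h <;> simp only [hwh, if_pos, if_neg, not_false_iff] at hpre ⊢ <;>
  · rw [pvWhileGt_eq_firstFit, pvWhileGt_eq_firstFit, Nat.zero_add, List.map_drop,
      pvFirstFit_drop _ _ _ (by first
        | exact (by decide : (portrait_formats.map Prod.snd).Pairwise (· ≤ ·))
        | exact (by decide : (landscape_formats.map Prod.snd).Pairwise (· ≤ ·)))]
    simp
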